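-- pv_equiv track=rewrite | github.com/Montuoro/psam | mcp-server/tools/hidden_cohort_analyzer.py | _get_highest_math_level
-- ===== SOURCE A (Python) =====
-- def _get_highest_math_level(courses):
--     """Determine the highest mathematics level a student is taking"""
--     math_hierarchy = [
--         "Mathematics Extension 2",
--         "Mathematics Extension 1",
--         "Mathematics Advanced",
--         "Mathematics Standard 2",
--         "Mathematics Standard 1"
--     ]
--
--     for math_level in math_hierarchy:
--         if math_level in courses:
--             return math_level
--
--     return "No Mathematics"
-- ===== SOURCE B (Python) =====
-- def _get_highest_math_level(courses):
--     """Determine the highest mathematics level a student is taking"""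
--     math_hierarchy = [
--         "Mathematics Extension 2",
--         "Mathematics Extension 1",
--         "Mathematics Advanced",
--         "Mathematics Standard 2",
--         "Mathematics Standard 1"
--     ]
--     rank = {name: i for i, name in enumerate(math_hierarchy)}
--     best = None
--     for course in courses:
--         r = rank.get(course)
--         if r is not None and (best is None or r < best):
--             best = r
--     return math_hierarchy[best] if best is not None else "No Mathematics"
-- ===== Notes on version B (the rewrite author's own statement) =====
-- stated objective: alternative
-- what changed: B traverses the input courses once, looking each course up in a precomputed name-to-rank dict and maintaining the minimum rank, instead of scanning the course list once per hierarchy level with early return.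
import Mathlib
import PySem

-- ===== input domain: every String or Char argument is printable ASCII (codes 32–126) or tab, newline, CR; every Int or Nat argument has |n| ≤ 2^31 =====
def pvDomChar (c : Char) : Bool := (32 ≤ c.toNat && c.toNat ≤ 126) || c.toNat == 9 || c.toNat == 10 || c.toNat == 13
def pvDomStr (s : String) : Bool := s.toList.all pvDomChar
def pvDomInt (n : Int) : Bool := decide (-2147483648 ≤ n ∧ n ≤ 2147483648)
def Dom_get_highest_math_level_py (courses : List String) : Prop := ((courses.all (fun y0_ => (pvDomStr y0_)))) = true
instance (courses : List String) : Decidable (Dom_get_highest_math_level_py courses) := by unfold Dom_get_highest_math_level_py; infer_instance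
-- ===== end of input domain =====

-- B traverses the course list once with a name→rank dict and a running minimum rank,
-- instead of A's scan of the course list once per hierarchy level; return values are identical.

-- ===== PORT A =====
def mathHierarchy : List String := [
  "Mathematics Extension 2",
  "Mathematics Extension 1",
  "Mathematics Advanced",
  "Mathematics Standard 2",
  "Mathematics Standard 1"
]

-- the 'for math_level in math_hierarchy' loop with early return
def goA (courses : List String) : List String → String
  | [] => "No Mathematics"
  | h :: t => if courses.contains h then h else goA courses t

def get_highest_math_level_py (courses : List String) : String :=
  goA courses mathHierarchy

-- ===== PORT B =====
-- rank = {name: i for i, name in enumerate(math_hierarchy)}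
def rankDict : PySem.Dict String Int :=
  (PySem.List.enumerate mathHierarchy 0).foldl (fun d p => d.insert p.2 p.1) PySem.Dict.empty

-- one iteration of B's loop: r = rank.get(course); update best if smaller
def altStep (best : Option Int) (c : String) : Option Int :=
  match rankDict.get? c with
  | none => best
  | some r =>
    match best with
    | none => some r
    | some b => if r < b then some r else best

def get_highest_math_level_py_alt (courses : List String) : String :=
  match courses.foldl altStep none with
  | some b => (PySem.List.pyGet? mathHierarchy b).getD "No Mathematics"
  | none => "No Mathematics"

-- ===== PRECONDITION & SPEC =====
def Spec_get_highest_math_level_py (courses : List String) (out : String) : Prop := out = get_highest_math_level_py_alt courses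
instance (courses : List String) (out : String) : Decidable (Spec_get_highest_math_level_py courses out) := by unfold Spec_get_highest_math_level_py; infer_instance

-- ===== CLAIM (what is proved, stated in full; the proofs are below) =====
def Claim_equal_get_highest_math_level_py : Prop := ∀ (courses : List String), Dom_get_highest_math_level_py courses → Spec_get_highest_math_level_py courses (get_highest_math_level_py courses)

-- ===== LEMMAS AND PROOFS =====

-- option-minimum combinator describing one step of B's loop
def mO : Option Int → Option Int → Option Int
  | none, y => y
  | some x, none => some x
  | some x, some y => if y < x then some y else some x

theorem altStep_eq (b : Option Int) (c : String) : altStep b c = mO b (rankDict.get? c) := by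
  cases h : rankDict.get? c <;> cases b <;> simp [altStep, mO, h]

theorem mO_assoc (a b c : Option Int) : mO (mO a b) c = mO a (mO b c) := by
  cases a <;> cases b <;> cases c <;> simp only [mO] <;> split_ifs <;>
    (try simp only [mO]) <;> (try split_ifs) <;> simp only [Option.some.injEq] <;> omega

theorem foldl_shift (cs : List String) : ∀ b, cs.foldl altStep b = mO b (cs.foldl altStep none) := by
  induction cs with
  | nil => intro b; cases b <;> simp [mO]
  | cons c cs ih =>
    intro b
    simp only [List.foldl_cons]
    rw [ih (altStep b c), ih (altStep none c), altStep_eq, altStep_eq, mO_assoc]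
    rfl

-- B's loop result characterised as the first-match chain over the hierarchy
def F (cs : List String) : Option Int :=
  if cs.contains "Mathematics Extension 2" then some 0
  else if cs.contains "Mathematics Extension 1" then some 1
  else if cs.contains "Mathematics Advanced" then some 2
  else if cs.contains "Mathematics Standard 2" then some 3
  else if cs.contains "Mathematics Standard 1" then some 4
  else none

theorem rank_eval (c : String) : rankDict.get? c =
    (if "Mathematics Extension 2" = c then some 0
     else if "Mathematics Extension 1" = c then some 1
     else if "Mathematics Advanced" = c then some 2
     else if "Mathematics Standard 2" = c then some 3
     else if "Mathematics Standard 1" = c then some 4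
     else none) := by
  have h : rankDict = PySem.Dict.mk
      [("Mathematics Extension 2", 0), ("Mathematics Extension 1", 1),
       ("Mathematics Advanced", 2), ("Mathematics Standard 2", 3),
       ("Mathematics Standard 1", 4)] := by rfl
  rw [h]
  simp only [PySem.Dict.get?_mk_cons, beq_iff_eq]
  rfl

theorem foldl_eq_F (cs : List String) : cs.foldl altStep none = F cs := by
  induction cs with
  | nil => simp [F]
  | cons c cs ih =>
    have h : (c :: cs).foldl altStep none = mO (rankDict.get? c) (cs.foldl altStep none) := by
      simp only [List.foldl_cons]
      rw [foldl_shift, altStep_eq]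
      rfl
    rw [h, ih, rank_eval, F, F]
    by_cases h0 : "Mathematics Extension 2" = c
    · subst h0; simp [mO]; split_ifs <;> simp
    by_cases h1 : "Mathematics Extension 1" = c
    · subst h1; simp [*, mO]; split_ifs <;> simp
    by_cases h2 : "Mathematics Advanced" = c
    · subst h2; simp [*, mO]; split_ifs <;> simp
    by_cases h3 : "Mathematics Standard 2" = c
    · subst h3; simp [*, mO]; split_ifs <;> simp
    by_cases h4 : "Mathematics Standard 1" = c
    · subst h4; simp [*, mO]; split_ifs <;> simp
    · simp [*, mO]

-- ===== VERDICT (by name: the statement is the Claim_ definition above) =====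
theorem get_highest_math_level_py_spec : Claim_equal_get_highest_math_level_py := by
  intro cs _
  unfold Spec_get_highest_math_level_py get_highest_math_level_py get_highest_math_level_py_alt
  rw [foldl_eq_F]
  simp only [mathHierarchy, goA, F]
  split_ifs <;> simp [PySem.List.pyGet?, PySem.List.pyIdx?]
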